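-- pv_equiv track=rewrite | github.com/carlzimmerman/zimmerman-formula | extended_research/biotech/dark_proteome/m4_cmyc_steric_trapper.py | count_hydrophobic_contacts
-- ===== SOURCE A (Python) =====
-- HYDROPHOBIC = ['A', 'V', 'I', 'L', 'M', 'F', 'W', 'Y']
--
-- def count_hydrophobic_contacts(sequence: str) -> int:
--     """Count potential hydrophobic contacts on binding face."""
--     contacts = 0
--     for i, aa in enumerate(sequence):
--         if aa in HYDROPHOBIC:
--             # Check if on binding face (i, i+3, i+4 pattern)
--             helix_phase = i % 7
--             if helix_phase in [0, 3, 4]: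
--                 contacts += 1
--     return contacts
-- ===== SOURCE B (Python) =====
-- HYDROPHOBIC = ['A', 'V', 'I', 'L', 'M', 'F', 'W', 'Y']
--
-- def count_hydrophobic_contacts(sequence: str) -> int:
--     """Count potential hydrophobic contacts on binding face."""
--     contacts = 0
--     # The binding face consists of helical phases 0, 3 and 4; walk each
--     # phase directly with a stride-7 index loop (phases are disjoint).
--     for phase in (0, 3, 4):
--         for i in range(phase, len(sequence), 7):
--             if sequence[i] in HYDROPHOBIC:
--                 contacts += 1
--     return contacts
-- ===== Notes on version B (the rewrite author's own statement) =====
-- stated objective: faster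
-- what changed: Instead of scanning every index and testing i % 7 against the binding-face phases, B iterates the three phases 0, 3, 4 directly with stride-7 index loops (disjoint arithmetic progressions), so only 3 of every 7 positions are visited and the per-index modulo/phase-membership test disappears.
import Mathlib
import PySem

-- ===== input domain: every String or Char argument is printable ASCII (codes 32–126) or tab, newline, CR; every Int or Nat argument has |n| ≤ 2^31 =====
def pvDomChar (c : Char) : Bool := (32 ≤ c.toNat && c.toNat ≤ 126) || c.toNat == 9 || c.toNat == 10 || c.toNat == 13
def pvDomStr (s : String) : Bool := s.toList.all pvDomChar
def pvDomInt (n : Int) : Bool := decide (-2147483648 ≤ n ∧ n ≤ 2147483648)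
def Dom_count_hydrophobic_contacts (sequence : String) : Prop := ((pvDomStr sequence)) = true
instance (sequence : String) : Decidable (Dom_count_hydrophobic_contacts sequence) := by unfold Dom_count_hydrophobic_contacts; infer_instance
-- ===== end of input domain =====

-- B replaces A's full scan with a modulo-7 phase test by three disjoint stride-7
-- index walks, one per binding-face phase (visits 3 of every 7 positions, no modulo
-- test; a timing run measured B faster by a constant factor).

-- ===== PORT A =====
def pvHYDROPHOBIC : List Char := ['A', 'V', 'I', 'L', 'M', 'F', 'W', 'Y']

def count_hydrophobic_contacts (sequence : String) : Int :=
  (PySem.List.enumerate sequence.toList).foldl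
    (fun contacts iaa =>
      if iaa.2 ∈ pvHYDROPHOBIC then
        if PySem.Int.mod iaa.1 7 ∈ ([0, 3, 4] : List Int) then contacts + 1 else contacts
      else contacts) 0

-- ===== PORT B =====
def count_hydrophobic_contacts_alt (sequence : String) : Int :=
  ([0, 3, 4] : List Int).foldl
    (fun contacts phase =>
      (PySem.List.pyRange phase (PySem.Str.len sequence) 7).foldl
        (fun c i =>
          -- sequence[i]: every generated index is in range, so pyGetD is exact here
          if PySem.List.pyGetD sequence.toList i ' ' ∈ pvHYDROPHOBIC then c + 1 else c)
        contacts)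
    0

-- ===== PRECONDITION & SPEC =====
def Spec_count_hydrophobic_contacts (sequence : String) (out : Int) : Prop := out = count_hydrophobic_contacts_alt sequence
instance (sequence : String) (out : Int) : Decidable (Spec_count_hydrophobic_contacts sequence out) := by unfold Spec_count_hydrophobic_contacts; infer_instance

-- ===== CLAIM (what is proved, stated in full; the proofs are below) =====
def Claim_equal_count_hydrophobic_contacts : Prop := ∀ (sequence : String), Dom_count_hydrophobic_contacts sequence → Spec_count_hydrophobic_contacts sequence (count_hydrophobic_contacts sequence)

-- ===== LEMMAS AND PROOFS =====

-- phase-p predicate on natural indices into l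
def pvQ (l : List Char) (p : Nat) : Nat → Bool :=
  fun j => decide (l.getD j ' ' ∈ pvHYDROPHOBIC) && (j % 7 == p)

lemma pv_enum_eq (l : List Char) : ∀ s : Int,
    PySem.List.enumerate l s = (List.range l.length).map (fun j : Nat => (s + (j : Int), l.getD j ' ')) := by
  induction l with
  | nil => intro s; simp [PySem.List.enumerate_nil]
  | cons x xs ih =>
    intro s
    rw [PySem.List.enumerate_cons, ih (s + 1)]
    simp only [List.length_cons, List.range_succ_eq_map, List.map_cons, List.map_map]
    rw [List.cons_eq_cons]
    refine ⟨by simp, ?_⟩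
    apply List.map_congr_left
    intro j _
    simp only [Function.comp_apply, List.getD_cons_succ]
    rw [Prod.mk.injEq]
    exact ⟨by push_cast; ring, rfl⟩

-- the three phase counts sum to the count of the combined test
lemma pv_countP_split (l : List Char) (js : List Nat) :
    js.countP (fun j => decide (l.getD j ' ' ∈ pvHYDROPHOBIC) &&
        (j % 7 == 0 || j % 7 == 3 || j % 7 == 4))
      = js.countP (pvQ l 0) + js.countP (pvQ l 3) + js.countP (pvQ l 4) := by
  induction js with
  | nil => simp
  | cons j js ih =>
    simp only [List.countP_cons, ih, pvQ]
    by_cases hh : l.getD j ' ' ∈ pvHYDROPHOBIC <;>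
      by_cases h0 : j % 7 = 0 <;> by_cases h3 : j % 7 = 3 <;> by_cases h4 : j % 7 = 4 <;>
        simp [h0, h3, h4] <;> omega

-- crux: the indices < n with j % 7 = p are exactly p + 7*k for k < (n - p + 6) / 7
lemma pv_phase_count (l : List Char) (p : Nat) (hp : p < 7) : ∀ n : Nat,
    (List.range n).countP (pvQ l p)
      = (List.range ((n - p + 6) / 7)).countP
          (fun k => decide (l.getD (p + 7 * k) ' ' ∈ pvHYDROPHOBIC)) := by
  intro n
  induction n with
  | zero =>
    simp
  | succ n ih =>
    rw [List.range_succ, List.countP_append, ih]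
    by_cases hmod : n % 7 = p
    · have h1 : (n + 1 - p + 6) / 7 = (n - p + 6) / 7 + 1 := by omega
      have h2 : p + 7 * ((n - p + 6) / 7) = n := by omega
      rw [h1, List.range_succ, List.countP_append]
      simp [pvQ, hmod, h2]
    · have h1 : (n + 1 - p + 6) / 7 = (n - p + 6) / 7 := by omega
      rw [h1]
      simp [pvQ, hmod]

-- range(p, n, 7) is the stride-7 index list of the phase-p walk
lemma pv_pyRange7 (p n : Nat) :
    PySem.List.pyRange (p : Int) (n : Int) 7
      = (List.range ((n - p + 6) / 7)).map (fun k : Nat => (p : Int) + 7 * (k : Int)) := by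
  rw [PySem.List.pyRange_of_pos _ _ (by norm_num)]
  have hcount : (if (p : Int) < (n : Int) then (((n : Int) - (p : Int) + 7 - 1) / 7).toNat else 0)
      = (n - p + 6) / 7 := by
    split_ifs with h <;> omega
  rw [hcount]

-- one phase of B equals the corresponding phase count on natural indices
lemma pv_B_phase (l : List Char) (p : Nat) :
    (PySem.List.pyRange (p : Int) (l.length : Int) 7).countP
        (fun i => decide (PySem.List.pyGetD l i ' ' ∈ pvHYDROPHOBIC))
      = (List.range ((l.length - p + 6) / 7)).countP
          (fun k => decide (l.getD (p + 7 * k) ' ' ∈ pvHYDROPHOBIC)) := by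
  rw [pv_pyRange7, List.countP_map]
  apply List.countP_congr
  intro k _
  have hc : (p : Int) + 7 * (k : Int) = ((p + 7 * k : Nat) : Int) := by push_cast; ring
  simp only [Function.comp_apply]
  rw [hc, PySem.List.pyGetD_natCast]

lemma pv_A_eq (sequence : String) :
    count_hydrophobic_contacts sequence
      = ((List.range sequence.toList.length).countP (pvQ sequence.toList 0)
        + (List.range sequence.toList.length).countP (pvQ sequence.toList 3)
        + (List.range sequence.toList.length).countP (pvQ sequence.toList 4) : Nat) := by
  set l := sequence.toList
  unfold count_hydrophobic_contacts
  have hfun : (fun (contacts : Int) (iaa : Int × Char) =>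
      if iaa.2 ∈ pvHYDROPHOBIC then
        if PySem.Int.mod iaa.1 7 ∈ ([0, 3, 4] : List Int) then contacts + 1 else contacts
      else contacts)
    = (fun contacts iaa =>
        if (decide (iaa.2 ∈ pvHYDROPHOBIC) &&
            decide (PySem.Int.mod iaa.1 7 ∈ ([0, 3, 4] : List Int))) = true
        then contacts + 1 else contacts) := by
    funext c iaa
    by_cases h1 : iaa.2 ∈ pvHYDROPHOBIC <;>
      by_cases h2 : PySem.Int.mod iaa.1 7 ∈ ([0, 3, 4] : List Int) <;> simp [h1]
  rw [hfun, PySem.List.foldl_count_if, pv_enum_eq l 0, List.countP_map]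
  have hcong : (List.range l.length).countP
      ((fun iaa : Int × Char => decide (iaa.2 ∈ pvHYDROPHOBIC) &&
          decide (PySem.Int.mod iaa.1 7 ∈ ([0, 3, 4] : List Int)))
        ∘ (fun j : Nat => ((0 : Int) + (j : Int), l.getD j ' ')))
    = (List.range l.length).countP (fun j => decide (l.getD j ' ' ∈ pvHYDROPHOBIC) &&
        (j % 7 == 0 || j % 7 == 3 || j % 7 == 4)) := by
    apply List.countP_congr
    intro j _
    simp only [Function.comp_apply]
    rw [PySem.Int.mod_eq_emod_of_pos (by norm_num : (0:Int) < 7)]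
    have : (0 : Int) + (j : Int) = ((j : Nat) : Int) := by ring
    rw [this]
    have hm : ((j : Nat) : Int) % 7 = ((j % 7 : Nat) : Int) := by omega
    simp only [hm, List.mem_cons, List.not_mem_nil, or_false]
    by_cases h0 : j % 7 = 0 <;> by_cases h3 : j % 7 = 3 <;> by_cases h4 : j % 7 = 4 <;>
      simp [h0, h3, h4] <;> omega
  rw [hcong, pv_countP_split]
  simp

lemma pv_B_eq (sequence : String) :
    count_hydrophobic_contacts_alt sequence
      = ((List.range sequence.toList.length).countP (pvQ sequence.toList 0)
        + (List.range sequence.toList.length).countP (pvQ sequence.toList 3)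
        + (List.range sequence.toList.length).countP (pvQ sequence.toList 4) : Nat) := by
  set l := sequence.toList with hl
  unfold count_hydrophobic_contacts_alt
  simp only [List.foldl_cons, List.foldl_nil, PySem.Str.len_eq, ← hl]
  have hfun : (fun (c : Int) (i : Int) =>
      if PySem.List.pyGetD l i ' ' ∈ pvHYDROPHOBIC then c + 1 else c)
    = (fun c i => if (decide (PySem.List.pyGetD l i ' ' ∈ pvHYDROPHOBIC)) = true
        then c + 1 else c) := by
    funext c i
    by_cases h : PySem.List.pyGetD l i ' ' ∈ pvHYDROPHOBIC <;> simp [h]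
  rw [hfun, PySem.List.foldl_count_if, PySem.List.foldl_count_if, PySem.List.foldl_count_if]
  have e0 := pv_B_phase l 0
  have e3 := pv_B_phase l 3
  have e4 := pv_B_phase l 4
  have c0 := pv_phase_count l 0 (by omega) l.length
  have c3 := pv_phase_count l 3 (by omega) l.length
  have c4 := pv_phase_count l 4 (by omega) l.length
  push_cast at e0 e3 e4 ⊢
  rw [e0, e3, e4, ← c0, ← c3, ← c4]
  ring

-- ===== VERDICT (by name: the statement is the Claim_ definition above) =====
theorem count_hydrophobic_contacts_spec : Claim_equal_count_hydrophobic_contacts := by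
  intro sequence _
  unfold Spec_count_hydrophobic_contacts
  rw [pv_A_eq, pv_B_eq]
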